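-- pv_equiv track=rewrite | github.com/Toruhiyo/trujilloai-landing-backend | src/utils/list_toolbox.py | find_duplicates_indices
-- ===== SOURCE A (Python) =====
-- def get_element_indices(ls: list, element) -> list:
--     return [i for i, e in enumerate(ls) if e == element]
--
-- def find_duplicates_indices(ls) -> list[int]:
--     indices = []
--     counted_elements = []
--     for i, e in enumerate(ls):
--         if e not in counted_elements:
--             idxs = get_element_indices(ls, e)
--             counted_elements.append(e)
--             if len(idxs) > 1:
--                 indices.append(idxs)
--     return indices
-- ===== SOURCE B (Python) =====
-- def find_duplicates_indices(ls) -> list[int]: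
--     groups = {}
--     for i, e in enumerate(ls):
--         groups.setdefault(e, []).append(i)
--     return [idxs for idxs in groups.values() if len(idxs) > 1]
-- ===== Notes on version B (the rewrite author's own statement) =====
-- stated objective: faster
-- what changed: replaced the per-new-element rescan of the whole list (get_element_indices inside the loop, plus a linear membership test on counted_elements) by a single pass that groups indices in a dict keyed by element, emitting groups with more than one index in insertion (= first-occurrence) order
import Mathlib
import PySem

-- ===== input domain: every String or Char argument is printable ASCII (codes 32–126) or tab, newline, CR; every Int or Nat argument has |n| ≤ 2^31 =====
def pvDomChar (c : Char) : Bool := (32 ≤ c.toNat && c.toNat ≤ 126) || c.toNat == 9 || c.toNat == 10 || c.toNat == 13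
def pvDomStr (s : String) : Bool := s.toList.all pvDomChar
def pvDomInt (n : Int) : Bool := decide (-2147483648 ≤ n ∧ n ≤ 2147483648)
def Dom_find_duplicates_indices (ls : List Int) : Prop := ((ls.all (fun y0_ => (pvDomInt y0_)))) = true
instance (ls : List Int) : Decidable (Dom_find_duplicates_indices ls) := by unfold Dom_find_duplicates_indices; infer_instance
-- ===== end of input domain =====

-- B replaces A's per-new-element rescan of the whole list by one dict-grouping pass (faster).

-- ===== PORT A =====
def get_element_indices (ls : List Int) (element : Int) : List Int :=
  ((PySem.List.enumerate ls).filter (fun p => p.2 == element)).map (·.1)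

def find_duplicates_indices (ls : List Int) : List (List Int) :=
  let st := (PySem.List.enumerate ls).foldl
    (fun (st : List (List Int) × List Int) p =>
      let (indices, counted) := st
      if p.2 ∈ counted then (indices, counted)
      else
        let idxs := get_element_indices ls p.2
        let counted := counted ++ [p.2]
        if idxs.length > 1 then (indices ++ [idxs], counted) else (indices, counted))
    ([], [])
  st.1

-- ===== PORT B =====
def find_duplicates_indices_alt (ls : List Int) : List (List Int) :=
  let groups := (PySem.List.enumerate ls).foldl
    (fun (d : PySem.Dict Int (List Int)) p => d.modify p.2 [] (· ++ [p.1]))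
    PySem.Dict.empty
  (PySem.Dict.values groups).filter (fun idxs => idxs.length > 1)

-- ===== PRECONDITION & SPEC =====
def Spec_find_duplicates_indices (ls : List Int) (out : List (List Int)) : Prop := out = find_duplicates_indices_alt ls
instance (ls : List Int) (out : List (List Int)) : Decidable (Spec_find_duplicates_indices ls out) := by unfold Spec_find_duplicates_indices; infer_instance

-- ===== CLAIM (what is proved, stated in full; the proofs are below) =====
def Claim_equal_find_duplicates_indices : Prop := ∀ (ls : List Int), Dom_find_duplicates_indices ls → Spec_find_duplicates_indices ls (find_duplicates_indices ls)

-- ===== LEMMAS AND PROOFS =====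

-- the new (not-yet-counted) distinct elements of a list, in first-occurrence order
def newDistinct (c : List Int) : List Int → List Int
  | [] => []
  | e :: rest => if e ∈ c then newDistinct c rest else e :: newDistinct (c ++ [e]) rest

theorem update_eq_append_newDistinct (es : List Int) : ∀ (c : List Int),
    PySem.Set.update c es = c ++ newDistinct c es := by
  induction es with
  | nil => intro c; simp [PySem.Set.update, newDistinct]
  | cons e rest ih =>
    intro c
    by_cases h : e ∈ c
    · have hadd : PySem.Set.add c e = c := by
        simp [PySem.Set.add, PySem.Set.contains, h]
      have hstep : PySem.Set.update c (e :: rest) = PySem.Set.update c rest := by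
        simp [PySem.Set.update, hadd]
      rw [hstep, ih, newDistinct]; simp [h]
    · have hadd : PySem.Set.add c e = c ++ [e] := by
        simp [PySem.Set.add, PySem.Set.contains, h]
      have hstep : PySem.Set.update c (e :: rest) = PySem.Set.update (c ++ [e]) rest := by
        simp [PySem.Set.update, hadd]
      rw [hstep, ih, newDistinct]; simp [h]

theorem newDistinct_eq_ofList (ls : List Int) :
    newDistinct [] ls = PySem.Set.ofList ls := by
  have := update_eq_append_newDistinct ls []
  simpa [PySem.Set.update, PySem.Set.ofList] using this.symm

-- A's loop invariant
theorem foldA (ls : List Int) (ps : List (Int × Int)) : ∀ (ind : List (List Int)) (c : List Int),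
    (ps.foldl
      (fun (st : List (List Int) × List Int) p =>
        let (indices, counted) := st
        if p.2 ∈ counted then (indices, counted)
        else
          let idxs := get_element_indices ls p.2
          let counted := counted ++ [p.2]
          if idxs.length > 1 then (indices ++ [idxs], counted) else (indices, counted))
      (ind, c)).1
    = ind ++ ((newDistinct c (ps.map (·.2))).map (get_element_indices ls)).filter
        (fun idxs => idxs.length > 1) := by
  induction ps with
  | nil => intro ind c; simp [newDistinct]
  | cons p rest ih =>
    intro ind c
    by_cases h : p.2 ∈ c
    · simp [List.foldl_cons, h, ih, newDistinct]
    · by_cases hl : (get_element_indices ls p.2).length > 1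
      · simp [List.foldl_cons, h, hl, ih, newDistinct]
      · simp [List.foldl_cons, h, hl, ih, newDistinct]

theorem A_closed (ls : List Int) :
    find_duplicates_indices ls
    = ((PySem.Set.ofList ls).map (get_element_indices ls)).filter (fun idxs => idxs.length > 1) := by
  have h := foldA ls (PySem.List.enumerate ls) [] []
  simp only [find_duplicates_indices]
  rw [h]
  simp [PySem.List.map_snd_enumerate, newDistinct_eq_ofList]

theorem B_closed (ls : List Int) :
    find_duplicates_indices_alt ls
    = ((PySem.Set.ofList ls).map (get_element_indices ls)).filter (fun idxs => idxs.length > 1) := by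
  simp only [find_duplicates_indices_alt]
  set d := (PySem.List.enumerate ls).foldl
    (fun (d : PySem.Dict Int (List Int)) p => d.modify p.2 [] (· ++ [p.1]))
    PySem.Dict.empty with hd
  have hkeys : d.keys = PySem.Set.ofList ls := by
    rw [hd, PySem.Dict.keys_foldl_modify_key (key := fun p : Int × Int => p.2)]
    simp [PySem.Dict.empty, PySem.Dict.keys, PySem.Set.update, PySem.Set.ofList,
      PySem.List.map_snd_enumerate]
  have hnodup : d.keys.Nodup := by
    rw [hkeys]; exact PySem.Set.nodup_ofList ls
  have hval : ∀ e : Int, d.getD e [] = get_element_indices ls e := by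
    intro e
    have hswap : d = ((PySem.List.enumerate ls).map (fun p => (p.2, p.1))).foldl
        (fun (d : PySem.Dict Int (List Int)) q => d.modify q.1 [] (· ++ [q.2]))
        PySem.Dict.empty := by
      rw [hd, List.foldl_map]
    rw [hswap, PySem.Dict.getD_foldl_modify_append]
    simp [get_element_indices, List.filter_map, List.map_map, Function.comp_def]
  rw [PySem.Dict.values_eq_map_keys d hnodup []]
  rw [hkeys]
  congr 1
  exact List.map_congr_left (fun e _ => hval e)

-- ===== VERDICT (by name: the statement is the Claim_ definition above) =====
theorem find_duplicates_indices_spec : Claim_equal_find_duplicates_indices := by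
  intro ls _
  show find_duplicates_indices ls = find_duplicates_indices_alt ls
  rw [A_closed, B_closed]
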